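-- pv_equiv track=rewrite | github.com/Pythonography/voiceapp | utils.py | highest_multiple_of_chunksize
-- ===== SOURCE A (Python) =====
-- def highest_multiple_of_chunksize(totaldur, chunksize):
--   """
--   This function finds the highest multiple of 5 which is less than a given number x.
--
--   Args:
--     x: An integer number.
--
--   Returns:
--     The highest multiple of 5 which is less than x.
--   """
--   # converts float to nearest integer
--   x = int(totaldur)
--   # Check if x is already a multiple of 5
--   if x % chunksize == 0:
--     return x
--   # Otherwise, subtract 5 until we find a multiple of 5
--   else:
--     while x % chunksize != 0:
--       x -= 1
--     return x
-- ===== SOURCE B (Python) =====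
-- def highest_multiple_of_chunksize(totaldur, chunksize):
--     x = int(totaldur)
--     return x - x % chunksize
-- ===== Notes on version B (the rewrite author's own statement) =====
-- stated objective: faster
-- what changed: Replaces the O(chunksize) decrement-until-divisible while-loop with the O(1) closed form x - x % chunksize.
-- outside the precondition, e.g. on highest_multiple_of_chunksize(7, 0): A raises ZeroDivisionError, B raises ZeroDivisionError; on highest_multiple_of_chunksize(7, -5): A returns 5, B returns 10
import Mathlib
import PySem

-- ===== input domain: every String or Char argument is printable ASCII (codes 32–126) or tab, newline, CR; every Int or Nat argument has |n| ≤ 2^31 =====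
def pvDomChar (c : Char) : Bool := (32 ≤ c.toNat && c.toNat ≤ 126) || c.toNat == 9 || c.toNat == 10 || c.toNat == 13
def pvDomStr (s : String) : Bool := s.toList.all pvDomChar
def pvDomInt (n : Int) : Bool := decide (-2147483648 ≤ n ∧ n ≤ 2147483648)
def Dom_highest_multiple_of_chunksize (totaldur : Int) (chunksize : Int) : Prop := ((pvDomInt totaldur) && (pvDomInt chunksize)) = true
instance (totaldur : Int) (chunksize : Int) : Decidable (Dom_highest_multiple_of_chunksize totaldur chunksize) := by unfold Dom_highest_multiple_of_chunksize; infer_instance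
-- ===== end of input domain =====

-- B replaces A's decrement-until-divisible loop by the closed form x - x % chunksize (simpler, constant-time).


-- ===== PORT A =====
-- the `while x % chunksize != 0: x -= 1` loop; fuel |chunksize| bounds the at most
-- |chunksize| - 1 decrements the Python loop performs (for chunksize ≠ 0)
def hmocLoop (chunksize : Int) (x : Int) (fuel : Nat) : Int :=
  match fuel with
  | 0 => x
  | fuel + 1 => if PySem.Int.mod x chunksize ≠ 0 then hmocLoop chunksize (x - 1) fuel else x

def highest_multiple_of_chunksize (totaldur : Int) (chunksize : Int) : Int :=
  let x := totaldur
  if PySem.Int.mod x chunksize = 0 then x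
  else hmocLoop chunksize x chunksize.natAbs

-- ===== PORT B =====
def highest_multiple_of_chunksize_alt (totaldur : Int) (chunksize : Int) : Int :=
  let x := totaldur
  x - PySem.Int.mod x chunksize

-- ===== PRECONDITION & SPEC =====
-- Pre_ excludes chunksize = 0 (Python A raises ZeroDivisionError there) and chunksize < 0,
-- a corner no caller specifies, where A's always-decrementing loop and B's floor-mod closed
-- form both return defensible but different values (largest multiple ≤ x vs. smallest ≥ x).
def Pre_highest_multiple_of_chunksize (totaldur : Int) (chunksize : Int) : Prop := 0 < chunksize
instance (totaldur : Int) (chunksize : Int) : Decidable (Pre_highest_multiple_of_chunksize totaldur chunksize) := by unfold Pre_highest_multiple_of_chunksize; infer_instance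
def pvWitness_highest_multiple_of_chunksize : Int × Int := (17, 5)

def Spec_highest_multiple_of_chunksize (totaldur : Int) (chunksize : Int) (out : Int) : Prop := out = highest_multiple_of_chunksize_alt totaldur chunksize
instance (totaldur : Int) (chunksize : Int) (out : Int) : Decidable (Spec_highest_multiple_of_chunksize totaldur chunksize out) := by unfold Spec_highest_multiple_of_chunksize; infer_instance

-- ===== CLAIM (what is proved, stated in full; the proofs are below) =====
def Claim_equal_highest_multiple_of_chunksize : Prop := ∀ (totaldur : Int) (chunksize : Int), Dom_highest_multiple_of_chunksize totaldur chunksize → Pre_highest_multiple_of_chunksize totaldur chunksize → Spec_highest_multiple_of_chunksize totaldur chunksize (highest_multiple_of_chunksize totaldur chunksize)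

-- ===== LEMMAS AND PROOFS =====
-- loop invariant: with enough fuel, the decrement loop lands on x - (x % c)
theorem hmocLoop_eq (c : Int) (hc : 0 < c) :
    ∀ (fuel : Nat) (x : Int), (PySem.Int.mod x c).toNat ≤ fuel →
      hmocLoop c x fuel = x - PySem.Int.mod x c := by
  intro fuel
  induction fuel with
  | zero =>
      intro x hx
      have h0 := PySem.Int.mod_nonneg x hc
      have : PySem.Int.mod x c = 0 := by omega
      simp [hmocLoop, this]
  | succ n ih =>
      intro x hx
      by_cases h : PySem.Int.mod x c = 0
      · simp [hmocLoop, h]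
      · have hpos : 0 < PySem.Int.mod x c := lt_of_le_of_ne (PySem.Int.mod_nonneg x hc) (Ne.symm h)
        have hlt : PySem.Int.mod x c < c := PySem.Int.mod_lt x hc
        have hme : PySem.Int.mod x c = x % c := PySem.Int.mod_eq_emod_of_pos hc
        have hme' : PySem.Int.mod (x - 1) c = (x - 1) % c := PySem.Int.mod_eq_emod_of_pos hc
        have hstep : PySem.Int.mod (x - 1) c = PySem.Int.mod x c - 1 := by
          rw [hme] at hpos hlt; rw [hme, hme']
          have h1 : (1 : Int) % c = 1 := Int.emod_eq_of_lt (by omega) (by omega)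
          rw [Int.sub_emod, h1]
          exact Int.emod_eq_of_lt (by omega) (by omega)
        have : hmocLoop c (x - 1) n = (x - 1) - PySem.Int.mod (x - 1) c := by
          apply ih
          omega
        simp only [hmocLoop, if_pos h]
        rw [this, hstep]
        ring

-- ===== VERDICT (by name: the statement is the Claim_ definition above) =====
theorem highest_multiple_of_chunksize_spec : Claim_equal_highest_multiple_of_chunksize := by
  intro t c _ hc
  unfold Spec_highest_multiple_of_chunksize highest_multiple_of_chunksize highest_multiple_of_chunksize_alt
  by_cases h : PySem.Int.mod t c = 0
  · simp [h]
  · simp only [if_neg h]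
    apply hmocLoop_eq c hc
    have := PySem.Int.mod_lt t hc
    omega
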